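-- pv_equiv track=rewrite | github.com/rabinkmc/dsa | python/score_difference.py | scoreDifference
-- ===== SOURCE A (Python) =====
-- from typing import List
--
-- def scoreDifference(nums: List[int]) -> int:
--     def swap_player(player):
--         return 1 - player
--     n = len(nums)
--     player = 0
--     scores = [0, 0]
--     for i in range(n):
--         if nums[i] % 2 == 1:
--             player = swap_player(player)
--         if (i + 1) % 6 == 0:
--             player = swap_player(player)
--         scores[player] += nums[i]
--     return scores[0] - scores[1]
-- ===== SOURCE B (Python) =====
-- from typing import List
--
-- def scoreDifference(nums: List[int]) -> int:
--     n = len(nums)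
--     total = 0
--     for x in nums:
--         total += x % 2
--     diff = 0
--     odds_after = 0
--     for i in reversed(range(n)):
--         x = nums[i]
--         if (total - odds_after + (i + 1) // 6) % 2 == 0:
--             diff += x
--         else:
--             diff -= x
--         odds_after += x % 2
--     return diff
-- ===== Notes on version B (the rewrite author's own statement) =====
-- stated objective: alternative
-- what changed: Replaces A's forward flip-on-event state machine (a player bit toggled by two events and a two-bucket scores list) with a two-stage computation: a first pass counts all odd elements, then a reverse traversal derives each element's scoring side from the total minus a running suffix odd-count plus the elapsed-sixths term, accumulating one signed difference directly.
import Mathlib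
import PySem

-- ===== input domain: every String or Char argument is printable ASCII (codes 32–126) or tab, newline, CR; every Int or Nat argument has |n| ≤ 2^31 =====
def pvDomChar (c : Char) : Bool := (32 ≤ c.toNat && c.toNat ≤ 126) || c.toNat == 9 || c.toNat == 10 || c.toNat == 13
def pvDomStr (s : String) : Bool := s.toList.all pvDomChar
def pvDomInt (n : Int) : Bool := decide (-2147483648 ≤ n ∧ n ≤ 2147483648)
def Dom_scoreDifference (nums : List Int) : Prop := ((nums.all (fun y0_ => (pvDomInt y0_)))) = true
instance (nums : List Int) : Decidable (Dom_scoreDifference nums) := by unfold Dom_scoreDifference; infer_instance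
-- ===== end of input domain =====

-- B replaces A's forward flip-on-event state machine by two stages: a pass counting all
-- odd elements, then a reverse traversal deriving each element's side from the total odd
-- count minus a running suffix odd count (alternative decomposition, same cost).

-- ===== PORT A =====
-- port of A's inner helper swap_player
def pvSwap (player : Int) : Int := 1 - player

-- one iteration of A's for-loop; nums[i] is always in range (i ∈ range(len(nums))), so pyGetD is exact
def pvAStep (nums : List Int) (st : Int × List Int) (i : Int) : Int × List Int :=
  let player := if PySem.Int.mod (PySem.List.pyGetD nums i 0) 2 == 1 then pvSwap st.1 else st.1
  let player := if PySem.Int.mod (i + 1) 6 == 0 then pvSwap player else player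
  (player, st.2.modify player.toNat (fun s => s + PySem.List.pyGetD nums i 0))

def scoreDifference (nums : List Int) : Int :=
  let n : Int := nums.length
  let st := (PySem.List.pyRange 0 n 1).foldl (pvAStep nums) (0, [0, 0])
  PySem.List.pyGetD st.2 0 0 - PySem.List.pyGetD st.2 1 0

-- ===== PORT B =====
-- B stage 1: total += x % 2 over the list
def pvTotalStep (t x : Int) : Int := t + PySem.Int.mod x 2

-- B stage 2 body: one iteration of the reverse loop, state (diff, odds_after)
def pvBStep (total : Int) (nums : List Int) (st : Int × Int) (i : Int) : Int × Int :=
  let x := PySem.List.pyGetD nums i 0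
  let diff := if PySem.Int.mod (total - st.2 + PySem.Int.floordiv (i + 1) 6) 2 == 0
              then st.1 + x else st.1 - x
  (diff, st.2 + PySem.Int.mod x 2)

def scoreDifference_alt (nums : List Int) : Int :=
  let n : Int := nums.length
  let total := nums.foldl pvTotalStep 0
  (((PySem.List.pyRange 0 n 1).reverse).foldl (pvBStep total nums) (0, 0)).1

-- ===== PRECONDITION & SPEC =====
def Spec_scoreDifference (nums : List Int) (out : Int) : Prop := out = scoreDifference_alt nums
instance (nums : List Int) (out : Int) : Decidable (Spec_scoreDifference nums out) := by unfold Spec_scoreDifference; infer_instance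

-- ===== CLAIM (what is proved, stated in full; the proofs are below) =====
def Claim_equal_scoreDifference : Prop := ∀ (nums : List Int), Dom_scoreDifference nums → Spec_scoreDifference nums (scoreDifference nums)

-- ===== LEMMAS AND PROOFS =====

-- running count Σ x % 2 (B's stage 1, with PySem.Int.mod rewritten to emod)
def pvCnt : List Int → Int
  | [] => 0
  | x :: l => x % 2 + pvCnt l

lemma pvCnt_eq_foldl (l : List Int) : ∀ t : Int, l.foldl (fun t x => t + x % 2) t = t + pvCnt l := by
  induction l with
  | nil => intro t; simp [pvCnt]
  | cons x l ih => intro t; rw [List.foldl_cons, ih]; simp only [pvCnt]; omega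

lemma pvCnt_cons (x : Int) (l : List Int) : pvCnt (x :: l) = x % 2 + pvCnt l := rfl

lemma pvCnt_append (l1 l2 : List Int) : pvCnt (l1 ++ l2) = pvCnt l1 + pvCnt l2 := by
  induction l1 with
  | nil => simp [pvCnt]
  | cons x l ih => simp only [List.cons_append, pvCnt, ih]; omega

-- let-free form of A's loop body (proof-side only)
def pvFA (nums : List Int) (st : Int × List Int) (i : Int) : Int × List Int :=
  ((if (i + 1) % 6 = 0 then 1 - (if PySem.List.pyGetD nums i 0 % 2 = 1 then 1 - st.1 else st.1)
      else (if PySem.List.pyGetD nums i 0 % 2 = 1 then 1 - st.1 else st.1)),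
   st.2.modify (if (i + 1) % 6 = 0 then 1 - (if PySem.List.pyGetD nums i 0 % 2 = 1 then 1 - st.1 else st.1)
      else (if PySem.List.pyGetD nums i 0 % 2 = 1 then 1 - st.1 else st.1)).toNat
     (fun s => s + PySem.List.pyGetD nums i 0))

-- let-free form of B's reverse-loop body with the total expressed as pvCnt nums (proof-side only)
def pvFB (nums : List Int) (i : Int) (st : Int × Int) : Int × Int :=
  ((if (pvCnt nums - st.2 + (i + 1) / 6) % 2 = 0
    then st.1 + PySem.List.pyGetD nums i 0 else st.1 - PySem.List.pyGetD nums i 0),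
   st.2 + PySem.List.pyGetD nums i 0 % 2)

def pvBit (c : Prop) [Decidable c] : Int := if c then 1 else 0

lemma pvFA_eval (nums : List Int) (a p s0 s1 : Int) (hp : p = 0 ∨ p = 1) :
    pvFA nums (p, [s0, s1]) a =
      ((p + pvBit (PySem.List.pyGetD nums a 0 % 2 = 1) + pvBit ((a + 1) % 6 = 0)) % 2,
       if (p + pvBit (PySem.List.pyGetD nums a 0 % 2 = 1) + pvBit ((a + 1) % 6 = 0)) % 2 = 0
       then [s0 + PySem.List.pyGetD nums a 0, s1]
       else [s0, s1 + PySem.List.pyGetD nums a 0]) := by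
  rcases hp with rfl | rfl <;>
    by_cases h1 : PySem.List.pyGetD nums a 0 % 2 = 1 <;>
    by_cases h2 : (a + 1) % 6 = 0 <;>
    simp [pvFA, pvBit, h1, h2, List.modify]

-- the PySem arithmetic in A's ported body agrees with pvFA (divisors 2 and 6 are positive)
lemma pvBridgeA (nums : List Int) : pvAStep nums = pvFA nums := by
  have h2 : ∀ y : Int, PySem.Int.mod y 2 = y % 2 := fun y => PySem.Int.mod_eq_emod_of_pos (by norm_num)
  have h6 : ∀ y : Int, PySem.Int.mod y 6 = y % 6 := fun y => PySem.Int.mod_eq_emod_of_pos (by norm_num)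
  funext st i
  simp only [pvAStep, pvSwap, pvFA, h2, h6, beq_iff_eq]

-- likewise for B's ported reverse-loop body (flipped to foldr argument order)
lemma pvBridgeB (nums : List Int) :
    (fun (i : Int) (st : Int × Int) => pvBStep (nums.foldl pvTotalStep 0) nums st i) = pvFB nums := by
  have h2 : ∀ y : Int, PySem.Int.mod y 2 = y % 2 := fun y => PySem.Int.mod_eq_emod_of_pos (by norm_num)
  have hd : ∀ y : Int, PySem.Int.floordiv y 6 = y / 6 := fun y => PySem.Int.floordiv_eq_ediv_of_pos (by norm_num)
  have ht : nums.foldl pvTotalStep 0 = pvCnt nums := by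
    have he : pvTotalStep = fun t x => t + x % 2 := by funext t x; rw [pvTotalStep, h2]
    rw [he, pvCnt_eq_foldl nums 0]; omega
  funext i st
  simp only [pvBStep, pvFB, h2, hd, ht, beq_iff_eq]

-- main invariant: starting at index a with A's player bit p = (odds-so-far + a/6) % 2,
-- A's remaining forward fold widens the gap s0 - s1 by exactly B's remaining foldr value,
-- and B's suffix odd count is the count over nums.drop a
lemma pvKey (nums : List Int) (n : Int) (hn : n = (nums.length : Int)) :
    ∀ (k : Nat) (a p s0 s1 : Int), (n - a).toNat = k → 0 ≤ a → a ≤ n →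
      p = (pvCnt (nums.take a.toNat) + a / 6) % 2 →
      (PySem.List.pyGetD ((PySem.List.pyRange a n 1).foldl (pvFA nums) (p, [s0, s1])).2 0 0
        - PySem.List.pyGetD ((PySem.List.pyRange a n 1).foldl (pvFA nums) (p, [s0, s1])).2 1 0
      = s0 - s1 + ((PySem.List.pyRange a n 1).foldr (pvFB nums) (0, 0)).1)
      ∧ ((PySem.List.pyRange a n 1).foldr (pvFB nums) (0, 0)).2 = pvCnt (nums.drop a.toNat) := by
  intro k
  induction k with
  | zero =>
    intro a p s0 s1 hk ha han hp
    have han : a = n := by omega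
    rw [PySem.List.pyRange_one_eq_nil (by omega)]
    have hdrop : nums.drop a.toNat = [] := List.drop_eq_nil_of_le (by omega)
    simp [PySem.List.pyGetD, hdrop, pvCnt]
  | succ k ih =>
    intro a p s0 s1 hk ha han hp
    have halt : a < n := by omega
    have hlt : a.toNat < nums.length := by omega
    have hx : PySem.List.pyGetD nums a 0 = nums[a.toNat] := by
      exact PySem.List.pyGetD_eq_getElem nums 0 ha (by omega)
    have hsucc : (a + 1).toNat = a.toNat + 1 := by omega
    have h0 : pvCnt ([] : List Int) = 0 := rfl
    have htake : pvCnt (nums.take (a + 1).toNat) = pvCnt (nums.take a.toNat) + nums[a.toNat] % 2 := by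
      rw [hsucc, List.take_add_one, List.getElem?_eq_getElem hlt, Option.toList_some,
        pvCnt_append, pvCnt_cons]
      omega
    have hdrop : nums.drop a.toNat = nums[a.toNat] :: nums.drop (a + 1).toNat := by
      rw [hsucc]; exact List.drop_eq_getElem_cons hlt
    have htotal : pvCnt nums = pvCnt (nums.take (a + 1).toNat) + pvCnt (nums.drop (a + 1).toNat) := by
      conv_lhs => rw [← List.take_append_drop (a + 1).toNat nums]
      rw [pvCnt_append]
    obtain ⟨ihgap, ihcnt⟩ := ih (a + 1) ((pvCnt (nums.take (a + 1).toNat) + (a + 1) / 6) % 2)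
      0 0 (by omega) (by omega) (by omega) rfl
    rw [PySem.List.pyRange_one_cons (by omega), List.foldl_cons, List.foldr_cons,
      pvFA_eval nums a p s0 s1 (by omega)]
    have hb1 : pvBit (PySem.List.pyGetD nums a 0 % 2 = 1) = nums[a.toNat] % 2 := by
      rw [hx]; unfold pvBit; split_ifs with h <;> omega
    have hb2 : pvBit ((a + 1) % 6 = 0) = (a + 1) / 6 - a / 6 := by
      unfold pvBit; split_ifs <;> omega
    have hp' : (p + pvBit (PySem.List.pyGetD nums a 0 % 2 = 1) + pvBit ((a + 1) % 6 = 0)) % 2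
        = (pvCnt (nums.take (a + 1).toNat) + (a + 1) / 6) % 2 := by
      rw [hb1, hb2, htake]; omega
    rw [hp']
    simp only [pvFB, hx, ihcnt, htotal, add_sub_cancel_right]
    by_cases hc : (pvCnt (nums.take (a + 1).toNat) + (a + 1) / 6) % 2 = 0
    · rw [if_pos hc, if_pos hc]
      refine ⟨?_, by rw [hdrop, pvCnt_cons]; omega⟩
      have := (ih (a + 1) ((pvCnt (nums.take (a + 1).toNat) + (a + 1) / 6) % 2)
        (s0 + nums[a.toNat]) s1 (by omega) (by omega) (by omega) rfl).1
      rw [this]; omega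
    · rw [if_neg hc, if_neg hc]
      refine ⟨?_, by rw [hdrop, pvCnt_cons]; omega⟩
      have := (ih (a + 1) ((pvCnt (nums.take (a + 1).toNat) + (a + 1) / 6) % 2)
        s0 (s1 + nums[a.toNat]) (by omega) (by omega) (by omega) rfl).1
      rw [this]; omega

-- ===== VERDICT (by name: the statement is the Claim_ definition above) =====
theorem scoreDifference_spec : Claim_equal_scoreDifference := by
  intro nums _
  simp only [Spec_scoreDifference, scoreDifference, scoreDifference_alt]
  rw [List.foldl_reverse, pvBridgeA nums, pvBridgeB nums]
  have h := (pvKey nums (nums.length : Int) rfl nums.length 0 0 0 0 (by omega) (by omega)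
    (by omega) (by simp [pvCnt])).1
  rw [h]; omega
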